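-- pv_equiv track=rewrite | github.com/smullins7/advent-of-code | 2024/day_17.py | try_to_get_back
-- ===== SOURCE A (Python) =====
-- def try_to_get_back(n):
--     for i in range(0,8):
--         for j in range(0, 8):
--             b = i ^ 2
--             b = b ^ j
--             b = b ^ 7
--             if b % 8 == n:
--                 yield i, j
-- ===== SOURCE B (Python) =====
-- def try_to_get_back(n):
--     # single loop: invert the xor algebraically and keep the partner only if it is in range
--     for i in range(0, 8):
--         j = i ^ 2 ^ 7 ^ n
--         if 0 <= j < 8:
--             yield i, j
-- ===== Notes on version B (the rewrite author's own statement) =====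
-- stated objective: simpler
-- what changed: Replaces A's nested scan over all (i, j) pairs with a single loop that computes each i's unique xor-inverse partner j directly and keeps it only when it lies in the valid range.
import Mathlib
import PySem

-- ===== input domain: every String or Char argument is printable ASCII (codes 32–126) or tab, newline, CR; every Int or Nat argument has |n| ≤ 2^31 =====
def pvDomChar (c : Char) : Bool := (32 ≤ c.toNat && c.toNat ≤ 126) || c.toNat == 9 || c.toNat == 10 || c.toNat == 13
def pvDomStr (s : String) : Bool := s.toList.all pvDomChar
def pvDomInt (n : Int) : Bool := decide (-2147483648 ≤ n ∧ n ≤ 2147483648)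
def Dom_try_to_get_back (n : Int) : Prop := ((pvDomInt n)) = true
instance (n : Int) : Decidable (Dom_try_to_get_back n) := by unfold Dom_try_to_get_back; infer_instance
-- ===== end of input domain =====

-- ===== PORT A =====
-- B replaces A's nested scan by a single loop computing each i's unique xor-inverse partner directly, with a range guard (simpler).
def try_to_get_back (n : Int) : List (Int × Int) :=
  (PySem.List.pyRange 0 8 1).foldl (fun acc i =>
    (PySem.List.pyRange 0 8 1).foldl (fun acc2 j =>
      let b := PySem.Int.bxor i 2
      let b := PySem.Int.bxor b j
      let b := PySem.Int.bxor b 7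
      if PySem.Int.mod b 8 == n then acc2 ++ [(i, j)] else acc2) acc) []

-- ===== PORT B =====
def try_to_get_back_alt (n : Int) : List (Int × Int) :=
  (PySem.List.pyRange 0 8 1).foldl (fun acc i =>
    let j := PySem.Int.bxor (PySem.Int.bxor (PySem.Int.bxor i 2) 7) n
    if 0 ≤ j ∧ j < 8 then acc ++ [(i, j)] else acc) []

-- ===== PRECONDITION & SPEC =====
def Spec_try_to_get_back (n : Int) (out : List (Int × Int)) : Prop := out = try_to_get_back_alt n
instance (n : Int) (out : List (Int × Int)) : Decidable (Spec_try_to_get_back n out) := by unfold Spec_try_to_get_back; infer_instance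

-- ===== CLAIM (what is proved, stated in full; the proofs are below) =====
def Claim_equal_try_to_get_back : Prop := ∀ (n : Int), Dom_try_to_get_back n → Spec_try_to_get_back n (try_to_get_back n)

-- ===== LEMMAS AND PROOFS =====

-- a foldl whose step fixes every list element leaves the accumulator unchanged
theorem pvFoldlFix {α β : Type} (f : β → α → β) (l : List α) (acc : β)
    (h : ∀ b x, x ∈ l → f b x = b) : l.foldl f acc = acc := by
  induction l generalizing acc with
  | nil => rfl
  | cons y ys ih =>
      simp only [List.foldl_cons]
      rw [h acc y (by simp), ih]
      intro b x hx; exact h b x (by simp [hx])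

theorem pvXorGE (k m : Nat) (hk : k < 8) (hm : 8 ≤ m) : 8 ≤ k ^^^ m := by
  rcases Nat.lt_or_ge (k ^^^ m) 8 with h | h
  swap
  · exact h
  exfalso
  have hm8 : m < 8 := by
    have := Nat.xor_lt_two_pow (n := 3) (by simpa using hk) (by simpa using h)
    have hcan : k ^^^ (k ^^^ m) = m := by
      rw [← Nat.xor_assoc, Nat.xor_self, Nat.zero_xor]
    simpa [hcan] using this
  omega


-- with n < 0, xor of a nonnegative value with n is negative
theorem pvBxorNegRight (a n : Int) (ha : 0 ≤ a) (hn : n < 0) : PySem.Int.bxor a n < 0 := by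
  simp only [PySem.Int.bxor, if_pos ha, if_neg (by omega : ¬ (0 ≤ n))]
  omega

theorem pvA_empty (n : Int) (h : n < 0 ∨ 8 ≤ n) : try_to_get_back n = [] := by
  unfold try_to_get_back
  apply pvFoldlFix
  intro b i _
  apply pvFoldlFix
  intro b2 j _
  simp only []
  rw [if_neg]
  simp only [beq_iff_eq]
  intro hEq
  have h0 : 0 ≤ PySem.Int.mod (PySem.Int.bxor (PySem.Int.bxor (PySem.Int.bxor i 2) j) 7) 8 :=
    PySem.Int.mod_nonneg _ (by norm_num)
  have h1 : PySem.Int.mod (PySem.Int.bxor (PySem.Int.bxor (PySem.Int.bxor i 2) j) 7) 8 < 8 :=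
    PySem.Int.mod_lt _ (by norm_num)
  omega

theorem pvB_empty (n : Int) (h : n < 0 ∨ 8 ≤ n) : try_to_get_back_alt n = [] := by
  unfold try_to_get_back_alt
  apply pvFoldlFix
  intro b i hi
  rw [PySem.List.mem_pyRange_one] at hi
  simp only []
  rw [if_neg]
  rintro ⟨hj0, hj8⟩
  obtain ⟨hi0, hi8⟩ := hi
  have hk0 : 0 ≤ PySem.Int.bxor (PySem.Int.bxor i 2) 7 := by
    interval_cases i <;> decide
  have hk8 : PySem.Int.bxor (PySem.Int.bxor i 2) 7 < 8 := by
    interval_cases i <;> decide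
  rcases h with hn | hn
  · exact absurd (pvBxorNegRight _ n hk0 hn) (by omega)
  · have hco : PySem.Int.bxor (PySem.Int.bxor (PySem.Int.bxor i 2) 7) n
        = (((PySem.Int.bxor (PySem.Int.bxor i 2) 7).toNat ^^^ n.toNat : Nat) : Int) :=
      PySem.Int.bxor_of_nonneg hk0 (by omega)
    rw [hco] at hj8
    have hge : 8 ≤ (PySem.Int.bxor (PySem.Int.bxor i 2) 7).toNat ^^^ n.toNat :=
      pvXorGE _ _ (by omega) (by omega)
    omega

-- ===== VERDICT (by name: the statement is the Claim_ definition above) =====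
theorem try_to_get_back_spec : Claim_equal_try_to_get_back := by
  intro n _
  unfold Spec_try_to_get_back
  by_cases h : 0 ≤ n ∧ n < 8
  · obtain ⟨h1, h2⟩ := h
    interval_cases n <;> decide
  · rw [pvA_empty n (by omega), pvB_empty n (by omega)]
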